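-- pv_equiv track=rewrite | github.com/msr-sagor/getlink | create_playlist.py | is_probable_html
-- ===== SOURCE A (Python) =====
-- def is_probable_html(text: str) -> bool:
--     t = text.strip().lower()
--     html_signs = [
--         "<!doctype html",
--         "<html",
--         "<head",
--         "<body",
--         "<script",
--         "<title"
--     ]
--     return any(sign in t for sign in html_signs)
-- ===== SOURCE B (Python) =====
-- _TAGS = ("!doctype html", "html", "head", "body", "script", "title")
--
-- def is_probable_html(text: str) -> bool:
--     # Single left-to-right scan: at each '<' test the six tag words with
--     # startswith, instead of six full substring searches over the text.
--     t = text.strip().lower()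
--     n = len(t)
--     for i in range(n):
--         if t[i] == '<':
--             for tag in _TAGS:
--                 if t.startswith(tag, i + 1):
--                     return True
--     return False
-- ===== Notes on version B (the rewrite author's own statement) =====
-- stated objective: alternative
-- what changed: Replaces six independent substring searches (one per HTML sign) with a single left-to-right scan that, at each '<', tests the six tag words via startswith.
import Mathlib
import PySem

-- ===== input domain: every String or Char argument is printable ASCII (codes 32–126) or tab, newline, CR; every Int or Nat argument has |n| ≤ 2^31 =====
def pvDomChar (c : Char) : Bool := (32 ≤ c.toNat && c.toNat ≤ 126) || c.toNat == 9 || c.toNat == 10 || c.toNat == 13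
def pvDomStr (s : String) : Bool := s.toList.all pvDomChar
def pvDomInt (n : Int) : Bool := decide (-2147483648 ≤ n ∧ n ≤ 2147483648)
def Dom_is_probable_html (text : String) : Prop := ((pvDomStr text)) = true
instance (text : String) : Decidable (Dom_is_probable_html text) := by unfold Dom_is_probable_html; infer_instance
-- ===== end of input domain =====

-- B replaces A's six independent substring searches with one left-to-right scan
-- that tests the six tag words only at '<' characters (objective: alternative).

-- ===== PORT A =====
-- t = text.strip().lower(); any(sign in t for sign in html_signs)
def is_probable_html (text : String) : Bool :=
  let t := PySem.Str.lower (PySem.Str.strip text)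
  ["<!doctype html", "<html", "<head", "<body", "<script", "<title"].any
    (fun sign => PySem.Str.isIn sign t)

-- ===== PORT B =====
-- 'for tag in _TAGS: if t.startswith(tag, i+1)' — the inner loop of Source B,
-- run at a position whose character is '<'
def pvTagAt (rest : List Char) : Bool :=
  PySem.Chars.startswith rest "!doctype html".toList ||
  PySem.Chars.startswith rest "html".toList ||
  PySem.Chars.startswith rest "head".toList ||
  PySem.Chars.startswith rest "body".toList ||
  PySem.Chars.startswith rest "script".toList ||
  PySem.Chars.startswith rest "title".toList

-- the 'for i in range(n)' scan of Source B: advance one character at a time,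
-- returning True at the first '<' that is followed by one of the tag words
def pvScan : List Char → Bool
  | [] => false
  | c :: rest => if c = '<' then (if pvTagAt rest then true else pvScan rest) else pvScan rest

def is_probable_html_alt (text : String) : Bool :=
  pvScan (PySem.Str.lower (PySem.Str.strip text)).toList

-- ===== PRECONDITION & SPEC =====
def Spec_is_probable_html (text : String) (out : Bool) : Prop := out = is_probable_html_alt text
instance (text : String) (out : Bool) : Decidable (Spec_is_probable_html text out) := by unfold Spec_is_probable_html; infer_instance

-- ===== CLAIM (what is proved, stated in full; the proofs are below) =====
def Claim_equal_is_probable_html : Prop := ∀ (text : String), Dom_is_probable_html text → Spec_is_probable_html text (is_probable_html text)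

-- ===== LEMMAS AND PROOFS =====

-- proof-only generalisation of pvScan: the six tag words become a parameter,
-- so the induction never unfolds the character literals
def scanGen (ts : List (List Char)) : List Char → Bool
  | [] => false
  | c :: rest =>
      if c = '<' then
        (if ts.any (fun t => PySem.Chars.startswith rest t) then true else scanGen ts rest)
      else scanGen ts rest

def pvTags : List (List Char) :=
  ["!doctype html".toList, "html".toList, "head".toList, "body".toList,
   "script".toList, "title".toList]

lemma pvTagAt_eq (r : List Char) :
    pvTagAt r = pvTags.any (fun t => PySem.Chars.startswith r t) := by
  simp [pvTagAt, pvTags, List.any_cons, List.any_nil, Bool.or_assoc]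

lemma pvScan_eq (l : List Char) : pvScan l = scanGen pvTags l := by
  induction l with
  | nil => rfl
  | cons c rest ih => simp only [pvScan, scanGen, ih, pvTagAt_eq]

lemma scanGen_iff (ts : List (List Char)) (l : List Char) :
    scanGen ts l = true ↔ ∃ t ∈ ts, ('<' :: t) <:+: l := by
  induction l with
  | nil => simp [scanGen, List.infix_nil]
  | cons c rest ih =>
      by_cases hc : c = '<'
      · rw [scanGen, if_pos hc]
        by_cases ha : ts.any (fun t => PySem.Chars.startswith rest t) = true
        · rw [if_pos ha]
          obtain ⟨t, ht, hp⟩ := List.any_eq_true.mp ha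
          constructor
          · intro _
            exact ⟨t, ht, (List.cons_prefix_cons.mpr
              ⟨hc.symm, (PySem.Chars.startswith_iff _ _).mp hp⟩).isInfix⟩
          · intro _; rfl
        · rw [if_neg ha, ih]
          constructor
          · rintro ⟨t, ht, hi⟩
            exact ⟨t, ht, hi.trans (List.suffix_cons c rest).isInfix⟩
          · rintro ⟨t, ht, hi⟩
            rcases List.infix_cons_iff.mp hi with hp | hi'
            · obtain ⟨h1, h2⟩ := List.cons_prefix_cons.mp hp
              exact absurd (List.any_eq_true.mpr
                ⟨t, ht, (PySem.Chars.startswith_iff _ _).mpr h2⟩) ha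
            · exact ⟨t, ht, hi'⟩
      · rw [scanGen, if_neg hc, ih]
        constructor
        · rintro ⟨t, ht, hi⟩
          exact ⟨t, ht, hi.trans (List.suffix_cons c rest).isInfix⟩
        · rintro ⟨t, ht, hi⟩
          rcases List.infix_cons_iff.mp hi with hp | hi'
          · exact absurd (List.cons_prefix_cons.mp hp).1.symm hc
          · exact ⟨t, ht, hi'⟩

lemma pv_tl1 : "<!doctype html".toList = '<' :: "!doctype html".toList := by decide
lemma pv_tl2 : "<html".toList = '<' :: "html".toList := by decide
lemma pv_tl3 : "<head".toList = '<' :: "head".toList := by decide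
lemma pv_tl4 : "<body".toList = '<' :: "body".toList := by decide
lemma pv_tl5 : "<script".toList = '<' :: "script".toList := by decide
lemma pv_tl6 : "<title".toList = '<' :: "title".toList := by decide

-- ===== VERDICT (by name: the statement is the Claim_ definition above) =====
theorem is_probable_html_spec : Claim_equal_is_probable_html := by
  intro text _
  unfold Spec_is_probable_html is_probable_html is_probable_html_alt
  rw [Bool.eq_iff_iff, pvScan_eq, scanGen_iff]
  simp only [List.any_cons, List.any_nil, Bool.or_eq_true, Bool.or_false,
    PySem.Str.isIn_iff_infix]
  rw [pv_tl1, pv_tl2, pv_tl3, pv_tl4, pv_tl5, pv_tl6]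
  simp only [pvTags, List.exists_mem_cons_iff, List.not_mem_nil, false_and,
    exists_false, or_false]
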